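-- pv_equiv track=rewrite | github.com/mdmoeller/uroborus | ex/mutator/mutator.py | mutateLineAt
-- ===== SOURCE A (Python) =====
-- def mutateLineAt(splits, instanceNum, targetOp, replaceOp):
--
--     # No splits, just the rest of the line
--     if(len(splits) == 1):
--         return splits[0]
--
--     # Replacement has occurred, returning the rest of the line as is
--     if(instanceNum == 0):
--         return splits[0] + " " + targetOp + " " +  mutateLineAt(splits[1:], 0, \
--                                                                     targetOp, \
--                                                                     replaceOp)
--
--     # At the replacement instance, replace target operator with new operator.
--     if(instanceNum == 1):
--         return splits[0] + " " + replaceOp + " " +  mutateLineAt(splits[1:], 0, \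
--                                                                     targetOp, \
--                                                                     replaceOp)
--
--     # Count down until the operator we wish to replace is reached
--     return splits[0] + " " + targetOp + " " +  mutateLineAt(splits[1:], instanceNum-1,\
--                                                                 targetOp, replaceOp)
-- ===== SOURCE B (Python) =====
-- def mutateLineAt(splits, instanceNum, targetOp, replaceOp):
--     # Build the separator list up front, then interleave and join once.
--     seps = [targetOp] * (len(splits) - 1)
--     if 1 <= instanceNum <= len(seps):
--         seps[instanceNum - 1] = replaceOp
--     parts = [splits[0]]
--     for sep, tok in zip(seps, splits[1:]):
--         parts.append(sep)
--         parts.append(tok)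
--     return " ".join(parts)
-- ===== Notes on version B (the rewrite author's own statement) =====
-- stated objective: faster
-- what changed: Replaces A's counting-down recursion (which re-copies the growing suffix via string concatenation at every level) with a non-recursive build: a separator list with at most one slot replaced, interleaved with the tokens and joined once.
import Mathlib
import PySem

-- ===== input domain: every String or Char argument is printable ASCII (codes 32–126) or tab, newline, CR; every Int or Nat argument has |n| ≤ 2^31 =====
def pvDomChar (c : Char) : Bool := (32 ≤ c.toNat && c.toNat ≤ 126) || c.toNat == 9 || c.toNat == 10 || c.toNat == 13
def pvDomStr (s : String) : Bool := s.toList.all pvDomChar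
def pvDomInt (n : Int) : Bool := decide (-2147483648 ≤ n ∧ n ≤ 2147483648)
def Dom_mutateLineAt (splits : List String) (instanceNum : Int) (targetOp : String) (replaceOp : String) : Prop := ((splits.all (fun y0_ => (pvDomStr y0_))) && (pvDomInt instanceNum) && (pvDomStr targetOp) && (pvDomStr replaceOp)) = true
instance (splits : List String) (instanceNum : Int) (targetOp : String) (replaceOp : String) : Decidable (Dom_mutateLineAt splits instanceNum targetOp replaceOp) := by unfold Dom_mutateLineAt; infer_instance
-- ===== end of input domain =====

-- B replaces A's counting-down recursion with a one-shot build: a separator list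
-- (one slot possibly replaced) interleaved with the tokens and joined once.
-- Both ports agree on every non-empty splits; on [] the Python A raises IndexError (excluded by Pre_).

-- ===== PORT A =====
def mutateLineAt (splits : List String) (instanceNum : Int) (targetOp : String) (replaceOp : String) : String :=
  match splits with
  | [] => ""          -- Python: splits[0] raises IndexError here; excluded by Pre_
  | [s] => s          -- len(splits) == 1
  | s :: rest@(_ :: _) =>
    if instanceNum == 0 then
      s ++ " " ++ targetOp ++ " " ++ mutateLineAt rest 0 targetOp replaceOp
    else if instanceNum == 1 then
      s ++ " " ++ replaceOp ++ " " ++ mutateLineAt rest 0 targetOp replaceOp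
    else
      s ++ " " ++ targetOp ++ " " ++ mutateLineAt rest (instanceNum - 1) targetOp replaceOp

-- ===== PORT B =====
def mutateLineAt_alt (splits : List String) (instanceNum : Int) (targetOp : String) (replaceOp : String) : String :=
  match splits with
  | [] => ""          -- Python: splits[0] raises IndexError here; excluded by Pre_
  | s0 :: rest =>
    let seps0 := List.replicate rest.length targetOp
    let seps := if 1 ≤ instanceNum ∧ instanceNum ≤ (seps0.length : Int)
                then seps0.set (instanceNum - 1).toNat replaceOp else seps0
    let parts := (seps.zip rest).foldl (fun acc p => acc ++ [p.1, p.2]) [s0]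
    PySem.Str.join " " parts

-- ===== PRECONDITION & SPEC =====
-- Pre_ excludes only the empty list, on which the Python A raises IndexError (splits[0]).
def Pre_mutateLineAt (splits : List String) (instanceNum : Int) (targetOp : String) (replaceOp : String) : Prop := splits ≠ []
instance (splits : List String) (instanceNum : Int) (targetOp : String) (replaceOp : String) : Decidable (Pre_mutateLineAt splits instanceNum targetOp replaceOp) := by unfold Pre_mutateLineAt; infer_instance
def pvWitness_mutateLineAt : List String × Int × String × String := (["a", "b", "c"], 2, "+", "-")

def Spec_mutateLineAt (splits : List String) (instanceNum : Int) (targetOp : String) (replaceOp : String) (out : String) : Prop := out = mutateLineAt_alt splits instanceNum targetOp replaceOp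
instance (splits : List String) (instanceNum : Int) (targetOp : String) (replaceOp : String) (out : String) : Decidable (Spec_mutateLineAt splits instanceNum targetOp replaceOp out) := by unfold Spec_mutateLineAt; infer_instance

-- ===== CLAIM (what is proved, stated in full; the proofs are below) =====
def Claim_equal_mutateLineAt : Prop := ∀ (splits : List String) (instanceNum : Int) (targetOp : String) (replaceOp : String), Dom_mutateLineAt splits instanceNum targetOp replaceOp → Pre_mutateLineAt splits instanceNum targetOp replaceOp → Spec_mutateLineAt splits instanceNum targetOp replaceOp (mutateLineAt splits instanceNum targetOp replaceOp)

-- ===== LEMMAS AND PROOFS =====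

-- The separator list B builds, as a function of the tail length and the instance number.
def sepsFor (len : Nat) (n : Int) (t r : String) : List String :=
  if 1 ≤ n ∧ n ≤ (len : Int) then (List.replicate len t).set (n - 1).toNat r
  else List.replicate len t

-- Interleaved assembly: token, sep, token, sep, …
def assemble (s : String) : List (String × String) → String
  | [] => s
  | (a, b) :: ps => s ++ " " ++ a ++ " " ++ assemble b ps

theorem sepsFor_nonpos (len : Nat) (n : Int) (t r : String) (h : n ≤ 0) :
    sepsFor len n t r = List.replicate len t := by
  unfold sepsFor; rw [if_neg]; omega

theorem sepsFor_succ (len : Nat) (n : Int) (t r : String) :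
    sepsFor (len + 1) n t r =
      (if n = 1 then r else t) :: sepsFor len (if n = 1 then 0 else n - 1) t r := by
  rcases eq_or_ne n 1 with h1 | h1
  · subst h1
    rw [if_pos rfl, if_pos rfl]
    unfold sepsFor
    rw [if_pos (by constructor <;> omega : (1:Int) ≤ 1 ∧ (1:Int) ≤ ((len + 1 : Nat) : Int)),
        if_neg (by omega : ¬ ((1:Int) ≤ 0 ∧ (0:Int) ≤ (len : Int)))]
    simp [List.replicate_succ]
  · rw [if_neg h1, if_neg h1]
    unfold sepsFor
    by_cases h2 : 1 ≤ n ∧ n ≤ ((len + 1 : Nat) : Int)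
    · have hc : 1 ≤ n - 1 ∧ n - 1 ≤ (len : Int) := by
        obtain ⟨ha, hb⟩ := h2; push_cast at hb ⊢; omega
      rw [if_pos h2, if_pos hc]
      have hk : (n - 1).toNat = (n - 1 - 1).toNat + 1 := by
        obtain ⟨ha, _⟩ := hc; omega
      rw [List.replicate_succ, hk]
      rfl
    · have hc : ¬ (1 ≤ n - 1 ∧ n - 1 ≤ (len : Int)) := by
        push_cast at h2 ⊢; omega
      rw [if_neg h2, if_neg hc, List.replicate_succ]

theorem A_eq_assemble (rest : List String) (s0 : String) (n : Int) (t r : String) :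
    mutateLineAt (s0 :: rest) n t r = assemble s0 ((sepsFor rest.length n t r).zip rest) := by
  induction rest generalizing s0 n with
  | nil => simp [mutateLineAt, sepsFor, assemble]
  | cons s1 rest' ih =>
    rw [show (s1 :: rest').length = rest'.length + 1 from rfl, sepsFor_succ]
    rcases eq_or_ne n 1 with h1 | h1
    · subst h1
      rw [if_pos rfl, if_pos rfl]
      show mutateLineAt (s0 :: s1 :: rest') 1 t r = _
      rw [show mutateLineAt (s0 :: s1 :: rest') 1 t r
            = s0 ++ " " ++ r ++ " " ++ mutateLineAt (s1 :: rest') 0 t r from by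
            simp [mutateLineAt]]
      rw [ih s1 0, List.zip_cons_cons]
      rfl
    · rw [if_neg h1, if_neg h1]
      rcases eq_or_ne n 0 with h0 | h0
      · subst h0
        rw [show mutateLineAt (s0 :: s1 :: rest') 0 t r
              = s0 ++ " " ++ t ++ " " ++ mutateLineAt (s1 :: rest') 0 t r from by
              simp [mutateLineAt]]
        rw [ih s1 0, sepsFor_nonpos _ 0 t r (by omega),
            ← sepsFor_nonpos rest'.length (0 - 1) t r (by omega), List.zip_cons_cons]
        rfl
      · rw [show mutateLineAt (s0 :: s1 :: rest') n t r
              = s0 ++ " " ++ t ++ " " ++ mutateLineAt (s1 :: rest') (n - 1) t r from by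
              simp [mutateLineAt, h0, h1]]
        rw [ih s1 (n - 1), List.zip_cons_cons]
        rfl

theorem join_interleave (ps : List (String × String)) (s0 : String) :
    PySem.Str.join " " (s0 :: ps.flatMap (fun p => [p.1, p.2])) = assemble s0 ps := by
  induction ps generalizing s0 with
  | nil =>
    apply String.ext
    simp [PySem.Str.toList_join, PySem.Chars.join_singleton, assemble]
  | cons p ps' ih =>
    obtain ⟨a, b⟩ := p
    rw [show ((a, b) :: ps').flatMap (fun p => [p.1, p.2])
          = a :: b :: ps'.flatMap (fun p => [p.1, p.2]) from rfl]
    apply String.ext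
    rw [show assemble s0 ((a, b) :: ps') = s0 ++ " " ++ a ++ " " ++ assemble b ps' from rfl,
        ← ih b]
    simp only [PySem.Str.toList_join, List.map_cons, PySem.Chars.join_cons_cons,
      String.toList_append]
    cases hfm : ps'.flatMap (fun p => [p.1, p.2]) with
    | nil =>
      simp [PySem.Chars.join_singleton]
    | cons q qs =>
      simp [PySem.Chars.join_cons_cons]

theorem B_eq_assemble (rest : List String) (s0 : String) (n : Int) (t r : String) :
    mutateLineAt_alt (s0 :: rest) n t r = assemble s0 ((sepsFor rest.length n t r).zip rest) := by
  show PySem.Str.join " "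
      ((((if 1 ≤ n ∧ n ≤ ((List.replicate rest.length t).length : Int)
          then (List.replicate rest.length t).set (n - 1).toNat r
          else List.replicate rest.length t)).zip rest).foldl
        (fun acc p => acc ++ [p.1, p.2]) [s0]) = _
  have hseps : (if 1 ≤ n ∧ n ≤ ((List.replicate rest.length t).length : Int)
          then (List.replicate rest.length t).set (n - 1).toNat r
          else List.replicate rest.length t) = sepsFor rest.length n t r := by
    simp [sepsFor]
  rw [hseps,
      PySem.List.foldl_append_eq_flatMap (fun p : String × String => [p.1, p.2])
        ((sepsFor rest.length n t r).zip rest) [s0]]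
  exact join_interleave _ s0

-- ===== VERDICT (by name: the statement is the Claim_ definition above) =====
theorem mutateLineAt_spec : Claim_equal_mutateLineAt := by
  intro splits n t r _ hpre
  unfold Spec_mutateLineAt
  match splits with
  | [] => exact absurd rfl hpre
  | s0 :: rest => rw [A_eq_assemble, B_eq_assemble]
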